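-- pv_equiv track=rewrite | github.com/mr-godara/AI-Agent | agent/planner.py | _last_read_found
-- ===== SOURCE A (Python) =====
-- from typing import Any, Dict, List, Optional
--
-- def _last_read_found(history: List[Dict[str, Any]], text: str) -> bool:
--     for step in reversed(history):
--         if step.get("action") != "read":
--             continue
--         action_input = step.get("action_input")
--
--         same_target = False
--         if isinstance(action_input, dict):
--             same_target = str(action_input.get("text")) == text
--         elif isinstance(action_input, str):
--             same_target = action_input == text
--
--         if not same_target:
--             continue
--
--         observation = str(step.get("observation", ""))
--         return observation.startswith("FOUND:")
--
--     return False
-- ===== SOURCE B (Python) =====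
-- def _last_read_found(history, text):
--     # Two-phase: forward-collect every matching 'read' step, then inspect the last one.
--     matches = []
--     for step in history:
--         if step.get("action") != "read":
--             continue
--         action_input = step.get("action_input")
--         same_target = False
--         if isinstance(action_input, dict):
--             same_target = str(action_input.get("text")) == text
--         elif isinstance(action_input, str):
--             same_target = action_input == text
--         if same_target:
--             matches.append(step)
--     if not matches:
--         return False
--     return str(matches[-1].get("observation", "")).startswith("FOUND:")
-- ===== Notes on version B (the rewrite author's own statement) =====
-- stated objective: alternative
-- what changed: Replaces A's reversed-iteration early-return scan with a forward collect-all-matching-read-steps pass followed by a single inspection of the last collected step.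
import Mathlib
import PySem

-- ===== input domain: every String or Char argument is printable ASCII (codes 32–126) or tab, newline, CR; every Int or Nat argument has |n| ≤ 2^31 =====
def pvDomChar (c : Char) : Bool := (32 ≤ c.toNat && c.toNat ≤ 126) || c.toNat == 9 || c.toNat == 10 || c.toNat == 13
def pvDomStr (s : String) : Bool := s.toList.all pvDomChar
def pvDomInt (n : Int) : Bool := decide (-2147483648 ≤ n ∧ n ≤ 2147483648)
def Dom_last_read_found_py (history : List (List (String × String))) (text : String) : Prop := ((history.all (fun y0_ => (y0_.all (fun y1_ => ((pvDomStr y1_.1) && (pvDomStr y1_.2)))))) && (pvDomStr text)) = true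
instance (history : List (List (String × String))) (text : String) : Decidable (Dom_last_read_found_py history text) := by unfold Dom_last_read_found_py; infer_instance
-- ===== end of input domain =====

-- B changes the decomposition: instead of A's reversed-iteration early-return scan, B makes one
-- forward pass collecting every matching 'read' step and then inspects only the last collected step.

-- ===== PORT A =====
-- A's reverse loop with early return, as structural recursion over history.reverse.
-- Dicts are String-valued association lists; `step.get(k)` is first-match lookup (List.lookup).
-- On this domain action_input is a string whenever present, so Python's isinstance(str) branch
-- is the one taken (the isinstance(dict) branch is unreachable under the type convention);
-- a missing action_input (None) leaves same_target = False, ported as the `none` case.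
def lrfA_go (text : String) : List (List (String × String)) → Bool
  | [] => false
  | step :: rest =>
    if !(step.lookup "action" == some "read") then lrfA_go text rest
    else
      let same_target : Bool := match step.lookup "action_input" with
        | some s => s == text
        | none => false
      if !same_target then lrfA_go text rest
      else PySem.Str.startswith ((step.lookup "observation").getD "") "FOUND:"

def last_read_found_py (history : List (List (String × String))) (text : String) : Bool :=
  lrfA_go text history.reverse

-- ===== PORT B =====
def lrfB_pred (text : String) (step : List (String × String)) : Bool :=
  step.lookup "action" == some "read" &&
    (match step.lookup "action_input" with
      | some s => s == text
      | none => false)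

-- Source B's forward collecting loop (append-if), then the check on the last collected step.
def last_read_found_py_alt (history : List (List (String × String))) (text : String) : Bool :=
  let ms := history.foldl (fun acc step => if lrfB_pred text step then acc ++ [step] else acc) []
  match ms.getLast? with
  | none => false
  | some step => PySem.Str.startswith ((step.lookup "observation").getD "") "FOUND:"

-- ===== PRECONDITION & SPEC =====
def Spec_last_read_found_py (history : List (List (String × String))) (text : String) (out : Bool) : Prop := out = last_read_found_py_alt history text
instance (history : List (List (String × String))) (text : String) (out : Bool) : Decidable (Spec_last_read_found_py history text out) := by unfold Spec_last_read_found_py; infer_instance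

-- ===== CLAIM (what is proved, stated in full; the proofs are below) =====
def Claim_equal_last_read_found_py : Prop := ∀ (history : List (List (String × String))) (text : String), Dom_last_read_found_py history text → Spec_last_read_found_py history text (last_read_found_py history text)

-- ===== LEMMAS AND PROOFS =====

-- A's scan returns, on the list it walks, the observation check of the FIRST step matching the predicate.
theorem lrfA_go_eq_find (text : String) (l : List (List (String × String))) :
    lrfA_go text l =
      (match l.find? (lrfB_pred text) with
        | none => false
        | some step => PySem.Str.startswith ((step.lookup "observation").getD "") "FOUND:") := by
  induction l with
  | nil => rfl
  | cons step rest ih =>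
    by_cases h : lrfB_pred text step = true
    · obtain ⟨h1, h2⟩ : (step.lookup "action" == some "read") = true ∧
          (match step.lookup "action_input" with
            | some s => s == text | none => false) = true := by
        simpa [lrfB_pred] using h
      simp [lrfA_go, h1, h2, List.find?, h]
    · have hb : lrfB_pred text step = false := by simpa using h
      simp only [lrfA_go, List.find?, hb]
      by_cases h1 : (step.lookup "action" == some "read") = true
      · have h2 : (match step.lookup "action_input" with
            | some s => s == text | none => false) = false := by
          simpa [lrfB_pred, h1] using hb
        simp [h1, h2, ih]
      · have h1' : (step.lookup "action" == some "read") = false := by simpa using h1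
        simp [h1', ih]

-- Source B's append-if fold is List.filter.
theorem lrfB_fold_eq_filter_gen (text : String) (l : List (List (String × String)))
    (acc : List (List (String × String))) :
    l.foldl (fun acc step => if lrfB_pred text step then acc ++ [step] else acc) acc =
      acc ++ l.filter (lrfB_pred text) := by
  induction l generalizing acc with
  | nil => simp
  | cons a l ih =>
    simp only [List.foldl_cons, List.filter_cons]
    by_cases h : lrfB_pred text a = true
    · simp [h, ih]
    · simp [Bool.eq_false_iff.mpr h, ih]

theorem lrfB_fold_eq_filter (text : String) (l : List (List (String × String))) :
    l.foldl (fun acc step => if lrfB_pred text step then acc ++ [step] else acc) [] =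
      l.filter (lrfB_pred text) := by
  simpa using lrfB_fold_eq_filter_gen text l []

-- ===== VERDICT (by name: the statement is the Claim_ definition above) =====
theorem last_read_found_py_spec : Claim_equal_last_read_found_py := by
  intro history text _
  unfold Spec_last_read_found_py last_read_found_py last_read_found_py_alt
  rw [lrfB_fold_eq_filter, lrfA_go_eq_find]
  simp only [List.getLast?_eq_head?_reverse, ← List.filter_reverse, List.head?_filter]
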